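-- pv_equiv track=rewrite | github.com/JoonBeomLee/Algorithm_Python | site/PROGRAMMERS/src/python/스킬테스트/level02/영어끝말잇기.py | solution
-- ===== SOURCE A (Python) =====
-- def solution(n, words):
--     answer = []
--
--     player = 1
--     turn = 1
--
--     # 중복 문자 체크
--     seted_words = list(set(words))
--
--     # 중복 문자 체크 실행
--     if len(seted_words) != len(words):
--         re_word = []
--         for w_idx, word in enumerate(words):
--             if word not in re_word:
--                 re_word.append(word)
--             # 중복 문자 위치
--             else:
--                 answer = [player, turn]
--                 return answer
--
--             # 1회 turn
--             if w_idx % n == n - 1: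
--                 player = 1
--                 turn += 1
--             # 다음 player
--             else:
--                 player += 1
--
--     # 끝말잇기 실패
--     player = 2
--     turn = 1
--     for w_idx, word in enumerate(words):
--         # 첫턴은 패스
--         if w_idx == 0: continue
--
--         # 현재 단어 첫 spell이
--         # 이전 단어 마지막 spell과 다를 경우
--         # 끝말 잇기 실패
--         if word[0] != words[w_idx-1][-1]:
--
--             answer = [player, turn]
--             return answer
--
--         # 1회 turn
--         if w_idx % n == n - 1:
--             player = 1
--             turn += 1
--         # 다음 player
--         else:
--             player += 1
--
--
--     return [0, 0]
-- ===== SOURCE B (Python) =====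
-- def solution(n, words):
--     # occurrence index: word -> list of positions, in one grouping pass
--     occ = {}
--     for i, w in enumerate(words):
--         occ[w] = occ.get(w, []) + [i]
--     # second occurrences: the duplicate-rule violation candidates
--     seconds = [ixs[1] for ixs in occ.values() if len(ixs) >= 2]
--     if seconds:
--         i = min(seconds)
--     else:
--         # adjacent-pair chain check, staged: all break positions, then the first
--         breaks = [k for k, (prev, cur) in enumerate(zip(words, words[1:]), 1)
--                   if cur[0] != prev[-1]]
--         if not breaks:
--             return [0, 0]
--         i = breaks[0]
--     return [i % n + 1, i // n + 1]
-- ===== Notes on version B (the rewrite author's own statement) =====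
-- stated objective: alternative
-- what changed: B replaces A's single stateful pass (a growing re_word list plus incrementally updated player/turn counters with early return) by a staged, aggregate computation: it groups all occurrence indices per word into one dict, takes the minimum over the second occurrences to locate the duplicate violation, otherwise lists every adjacent-pair chain break over zip(words, words[1:]) and takes the first, converting the index with the divmod closed form [i % n + 1, i // n + 1].
-- intended difference: When n = 1 and the duplicate-free word list breaks the chain rule, A returns nonexistent player 2 on turn 1 (or a turn one too small) because its chain loop skips the bookkeeping for index 0 via 'continue'; B returns the intended [1, i // 1 + 1] - with a single player the i-th word is spoken by player 1 on turn i+1. — e.g. on solution(1, ["ab", "ca"]): A returns [2, 1], B returns [1, 2]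
-- outside the precondition, e.g. on solution(-2, ['a', 'ab', 'ba', 'ab']): A returns [4, 1], B returns [0, -1]; on solution(0, ['ab', 'ca']): A returns [2, 1], B raises ZeroDivisionError; on solution(2, ['ab', 'ca', '']): A returns [2, 1], B raises IndexError
import Mathlib
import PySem

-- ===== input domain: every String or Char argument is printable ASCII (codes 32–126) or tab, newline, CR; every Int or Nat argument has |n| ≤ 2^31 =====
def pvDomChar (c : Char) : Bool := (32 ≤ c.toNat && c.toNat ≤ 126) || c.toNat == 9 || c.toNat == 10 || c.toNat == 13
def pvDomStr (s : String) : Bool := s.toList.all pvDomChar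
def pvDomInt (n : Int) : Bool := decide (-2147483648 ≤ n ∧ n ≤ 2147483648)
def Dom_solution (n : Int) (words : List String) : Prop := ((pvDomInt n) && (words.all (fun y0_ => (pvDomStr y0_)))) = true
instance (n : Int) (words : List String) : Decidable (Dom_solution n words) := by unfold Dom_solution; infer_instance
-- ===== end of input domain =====

-- B replaces A's single stateful scan (growing re_word list, incrementally updated player/turn
-- counters, early return) by a staged aggregate computation: a per-word occurrence-index dict,
-- the minimum over second occurrences, else the first adjacent-pair chain break over
-- zip(words, words[1:]), converted by the divmod closed form (objective: alternative).

-- ===== PORT A =====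
-- the duplicate-check loop: some [player, turn] at the first repeated word, none if it falls through
def dupLoopA (n : Int) : List String → List String → Int → Int → Int → Option (List Int)
  | [], _, _, _, _ => none
  | w :: rest, re, i, player, turn =>
    if re.contains w = false then
      if PySem.Int.mod i n = n - 1 then dupLoopA n rest (re ++ [w]) (i + 1) 1 (turn + 1)
      else dupLoopA n rest (re ++ [w]) (i + 1) (player + 1) turn
    else some [player, turn]

-- the word-chain loop: word[0] vs words[w_idx-1][-1], index 0 skipped by 'continue'
def chainLoopA (n : Int) (words : List String) : List String → Int → Int → Int → List Int
  | [], _, _, _ => [0, 0]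
  | w :: rest, i, player, turn =>
    if i = 0 then chainLoopA n words rest (i + 1) player turn
    else if PySem.Str.pyGet? w 0 ≠ ((PySem.List.pyGet? words (i - 1)).bind fun p => PySem.Str.pyGet? p (-1)) then
      [player, turn]
    else if PySem.Int.mod i n = n - 1 then chainLoopA n words rest (i + 1) 1 (turn + 1)
    else chainLoopA n words rest (i + 1) (player + 1) turn

def solution (n : Int) (words : List String) : List Int :=
  if ((PySem.Set.ofList words).length : Int) ≠ (words.length : Int) then
    match dupLoopA n words [] 0 1 1 with
    | some a => a
    | none => chainLoopA n words words 0 2 1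
  else chainLoopA n words words 0 2 1

-- ===== PORT B =====
def solution_alt (n : Int) (words : List String) : List Int :=
  -- occ[w] = occ.get(w, []) + [i]  over 'for i, w in enumerate(words)' (pairs reordered key-first)
  let pairs : List (String × Int) := (PySem.List.enumerate words).map (fun p => (p.2, p.1))
  let occ : PySem.Dict String (List Int) :=
    pairs.foldl (fun d p => d.modify p.1 [] (· ++ [p.2])) PySem.Dict.empty
  -- [ixs[1] for ixs in occ.values() if len(ixs) >= 2]; ixs[1] is in range under the filter
  let seconds : List Int :=
    (occ.values.filter (fun ixs => decide (2 ≤ ixs.length))).map (fun ixs => PySem.List.pyGetD ixs 1 0)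
  match PySem.List.min? seconds (fun x => x) with
  | some i => [PySem.Int.mod i n + 1, PySem.Int.floordiv i n + 1]
  | none =>
    -- [k for k, (prev, cur) in enumerate(zip(words, words[1:]), 1) if cur[0] != prev[-1]]
    let breaks : List Int :=
      ((PySem.List.enumerate (List.zip words words.tail) 1).filter
          (fun q => decide (PySem.Str.pyGet? q.2.2 0 ≠ PySem.Str.pyGet? q.2.1 (-1)))).map
        (fun q => q.1)
    match breaks.head? with
    | some k => [PySem.Int.mod k n + 1, PySem.Int.floordiv k n + 1]
    | none => [0, 0]

-- ===== PRECONDITION & SPEC =====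
-- Pre_ excludes inputs outside the game's natural domain where the two programs' values are
-- accidents: n = 0 (A can divide by zero or, returning early, make B divide by zero) and other
-- non-positive player counts except where the game trivially passes with [0, 0] (on n < 0 A's
-- accumulator and B's Python floor-divmod disagree only through meaningless negative arithmetic),
-- and duplicate-free lists containing an empty word (the chain check can raise IndexError).
def Pre_solution (n : Int) (words : List String) : Prop :=
  (1 ≤ n ∨ (n ≤ -1 ∧ words.Nodup ∧ List.IsChain (fun a b => b.toList.head? = a.toList.getLast?) words)) ∧
    (words.Nodup → ∀ w ∈ words, w ≠ "")
instance (n : Int) (words : List String) : Decidable (Pre_solution n words) := by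
  unfold Pre_solution; infer_instance
def pvWitness_solution : Int × List String := (2, ["ab", "ba"])

-- When n = 1 and the duplicate-free word list breaks the chain rule, A reports nonexistent player 2
-- on turn 1 (or a turn one too small) because its chain loop skips the bookkeeping for index 0;
-- B returns the intended [1, i + 1]: with a single player the i-th word is spoken by player 1 on turn i + 1.
def D_solution (n : Int) (words : List String) : Prop :=
  n = 1 ∧ words.Nodup ∧ ¬ List.IsChain (fun a b => b.toList.head? = a.toList.getLast?) words
instance (n : Int) (words : List String) : Decidable (D_solution n words) := by
  unfold D_solution; infer_instance

def Spec_solution (n : Int) (words : List String) (out : List Int) : Prop :=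
  ¬ D_solution n words → out = solution_alt n words
instance (n : Int) (words : List String) (out : List Int) : Decidable (Spec_solution n words out) := by
  unfold Spec_solution; infer_instance

def pvDiffWitness_solution : Int × List String := (1, ["ab", "ca"])
def pvDiffWitnessOut_solution : (List Int) × (List Int) := ([2, 1], [1, 2])

-- ===== CLAIM (what is proved, stated in full; the proofs are below) =====
def Claim_unchanged_solution : Prop := ∀ (n : Int) (words : List String), Dom_solution n words → Pre_solution n words → Spec_solution n words (solution n words)
def Claim_changed_solution : Prop := Dom_solution (pvDiffWitness_solution.1) (pvDiffWitness_solution.2) ∧ Pre_solution (pvDiffWitness_solution.1) (pvDiffWitness_solution.2) ∧ D_solution (pvDiffWitness_solution.1) (pvDiffWitness_solution.2) ∧ solution (pvDiffWitness_solution.1) (pvDiffWitness_solution.2) = pvDiffWitnessOut_solution.1 ∧ solution_alt (pvDiffWitness_solution.1) (pvDiffWitness_solution.2) = pvDiffWitnessOut_solution.2 ∧ pvDiffWitnessOut_solution.1 ≠ pvDiffWitnessOut_solution.2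
def Claim_exact_solution : Prop := ∀ (n : Int) (words : List String), Dom_solution n words → Pre_solution n words → D_solution n words → solution n words ≠ solution_alt n words

-- ===== LEMMAS AND PROOFS =====

-- proof-side name for B's chain stage: the first-break index scan over range(1, len)
def chainScan (n : Int) (words : List String) : List Int → List Int
  | [] => [0, 0]
  | i :: rest =>
    if ((PySem.List.pyGet? words i).bind fun w => PySem.Str.pyGet? w 0)
        ≠ ((PySem.List.pyGet? words (i - 1)).bind fun p => PySem.Str.pyGet? p (-1)) then
      [PySem.Int.mod i n + 1, PySem.Int.floordiv i n + 1]
    else chainScan n words rest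

-- the divmod step: how (i % n, i // n) evolves when i increments, for 0 < n
lemma stepDivMod (n i : Int) (hn : 0 < n) :
    (PySem.Int.mod i n = n - 1 →
      PySem.Int.mod (i + 1) n = 0 ∧ PySem.Int.floordiv (i + 1) n = PySem.Int.floordiv i n + 1) ∧
    (PySem.Int.mod i n ≠ n - 1 →
      PySem.Int.mod (i + 1) n = PySem.Int.mod i n + 1 ∧ PySem.Int.floordiv (i + 1) n = PySem.Int.floordiv i n) := by
  have hq := PySem.Int.floordiv_mul_add_mod i n
  have hr0 := PySem.Int.mod_nonneg i (b := n) hn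
  have hr1 := PySem.Int.mod_lt i (b := n) hn
  have hq' := PySem.Int.floordiv_mul_add_mod (i + 1) n
  have hr0' := PySem.Int.mod_nonneg (i + 1) (b := n) hn
  have hr1' := PySem.Int.mod_lt (i + 1) (b := n) hn
  constructor
  · intro h
    have hd : PySem.Int.floordiv (i + 1) n = PySem.Int.floordiv i n + 1 := by
      rw [PySem.Int.floordiv_eq_iff_of_pos hn]
      constructor <;> nlinarith
    refine ⟨?_, hd⟩
    rw [hd] at hq'
    nlinarith
  · intro h
    have hr2 : PySem.Int.mod i n ≤ n - 2 := by omega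
    have hd : PySem.Int.floordiv (i + 1) n = PySem.Int.floordiv i n := by
      rw [PySem.Int.floordiv_eq_iff_of_pos hn]
      constructor <;> nlinarith
    refine ⟨?_, hd⟩
    rw [hd] at hq'
    nlinarith

lemma mod_zero_eq (n : Int) (hn : 0 < n) : PySem.Int.mod 0 n = 0 := by
  rw [PySem.Int.mod_eq_emod_of_pos hn]; simp

lemma floordiv_zero_eq (n : Int) (hn : 0 < n) : PySem.Int.floordiv 0 n = 0 := by
  rw [PySem.Int.floordiv_eq_ediv_of_pos hn]; simp

lemma mod_one_eq (n : Int) (hn : 2 ≤ n) : PySem.Int.mod 1 n = 1 := by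
  rw [PySem.Int.mod_eq_emod_of_pos (by omega)]
  exact Int.emod_eq_of_lt (by omega) (by omega)

lemma floordiv_one_eq (n : Int) (hn : 2 ≤ n) : PySem.Int.floordiv 1 n = 0 := by
  rw [PySem.Int.floordiv_eq_ediv_of_pos (by omega)]
  exact Int.ediv_eq_zero_of_lt (by omega) (by omega)

-- set(xs) built by Set.add: length equality with xs detects Nodup
lemma foldl_add_of_disjoint : ∀ (xs s : List String), xs.Nodup →
    (∀ x ∈ xs, s.contains x = false) →
    xs.foldl PySem.Set.add s = s ++ xs := by
  intro xs
  induction xs with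
  | nil => intro s _ _; simp
  | cons x t ih =>
    intro s hnd hdis
    simp only [List.foldl_cons]
    have hxs : x ∉ s := by have := hdis x (by simp); simpa using this
    have hx : PySem.Set.add s x = s ++ [x] := by
      simp [PySem.Set.add, PySem.Set.contains, hxs]
    rw [hx, ih (s ++ [x]) (by simp_all) ?_, List.append_assoc]
    · rfl
    · intro y hy
      have h1 : y ∉ s := by have := hdis y (by simp [hy]); simpa using this
      have h2 : y ≠ x := by rintro rfl; exact (List.nodup_cons.mp hnd).1 hy
      simp [h1, h2]

lemma ofList_sublist : ∀ (xs s : List String), ∃ t, xs.foldl PySem.Set.add s = s ++ t ∧ t.Sublist xs := by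
  intro xs
  induction xs with
  | nil => intro s; exact ⟨[], by simp⟩
  | cons x t ih =>
    intro s
    simp only [List.foldl_cons, PySem.Set.add, PySem.Set.contains]
    by_cases hc : x ∈ s
    · obtain ⟨u, hu, hs⟩ := ih s
      exact ⟨u, by simpa [hc] using hu, hs.cons _⟩
    · obtain ⟨u, hu, hs⟩ := ih (s ++ [x])
      refine ⟨x :: u, ?_, hs.cons₂ _⟩
      simp [hc, hu]

lemma setLen_eq_iff (xs : List String) :
    ((PySem.Set.ofList xs).length = xs.length) ↔ xs.Nodup := by
  constructor
  · intro h
    obtain ⟨t, ht, hs⟩ := ofList_sublist xs []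
    have he : PySem.Set.ofList xs = t := by simpa [PySem.Set.ofList, PySem.Set.empty] using ht
    rw [he] at h
    have h2 := hs.eq_of_length h
    have h3 := PySem.Set.nodup_ofList xs
    rw [he, h2] at h3
    exact h3
  · intro h
    have := foldl_add_of_disjoint xs [] h (by simp)
    simp only [PySem.Set.ofList, PySem.Set.empty]
    rw [this]
    simp

lemma pyGet?_of_toNat_lt (words : List String) (i : Int) (h0 : 0 ≤ i) (h1 : i.toNat < words.length) :
    PySem.List.pyGet? words i = some (words[i.toNat]) := by
  have h2 : i = ((i.toNat : Nat) : Int) := by omega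
  rw [show PySem.List.pyGet? words i = PySem.List.pyGet? words ((i.toNat : Nat) : Int) by rw [← h2],
    PySem.List.pyGet?_natCast]
  simp [h1]

lemma strGet_zero (w : String) : PySem.Str.pyGet? w 0 = w.toList.head? := by
  have := PySem.Str.pyGet?_natCast w 0
  simpa [List.head?_eq_getElem?] using this

lemma strGet_neg_one (w : String) : PySem.Str.pyGet? w (-1) = w.toList.getLast? := by
  simp [PySem.Str.pyGet?, PySem.Chars.pyGet?_eq_listPyGet?, PySem.List.pyGet?_neg_one]

-- ---------- duplicate phase ----------

-- k is a duplicate position: some earlier position holds the same word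
def IsDup (words : List String) (k : Nat) : Prop := ∃ j, j < k ∧ words[j]? = words[k]?

lemma mem_take_iff' (words : List String) (k : Nat) (w : String) :
    w ∈ words.take k ↔ ∃ j, j < k ∧ words[j]? = some w := by
  rw [List.mem_take_iff_getElem]
  constructor
  · rintro ⟨j, hj, rfl⟩
    exact ⟨j, by omega, List.getElem?_eq_getElem (by omega)⟩
  · rintro ⟨j, hj, hjw⟩
    have hlt : j < words.length := by
      by_contra hge
      rw [List.getElem?_eq_none (by omega)] at hjw
      exact absurd hjw (by simp)
    refine ⟨j, by omega, ?_⟩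
    have := List.getElem?_eq_getElem hlt
    rw [this] at hjw
    exact Option.some.inj hjw

-- A's duplicate loop computes the divmod closed form of the LEAST duplicate position
lemma dupA_spec (n : Int) (hn : 1 ≤ n) (words : List String) :
    ∀ (ws re : List String) (i : Int), 0 ≤ i → ws = words.drop i.toNat →
      (∀ v : String, v ∈ re ↔ v ∈ words.take i.toNat) →
      (dupLoopA n ws re i (PySem.Int.mod i n + 1) (PySem.Int.floordiv i n + 1) = none ∧
        ∀ k, i.toNat ≤ k → k < words.length → ¬ IsDup words k) ∨
      (∃ m : Nat, i.toNat ≤ m ∧ m < words.length ∧ IsDup words m ∧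
        (∀ k, i.toNat ≤ k → k < m → ¬ IsDup words k) ∧
        dupLoopA n ws re i (PySem.Int.mod i n + 1) (PySem.Int.floordiv i n + 1)
          = some [PySem.Int.mod (m : Int) n + 1, PySem.Int.floordiv (m : Int) n + 1]) := by
  intro ws
  induction ws with
  | nil =>
    intro re i hi hdrop hinv
    left
    refine ⟨by simp [dupLoopA], ?_⟩
    intro k hk hklen _
    have : words.length ≤ i.toNat := by
      by_contra hc
      exact absurd hdrop.symm (by simp [List.drop_eq_nil_iff]; omega)
    omega
  | cons w rest ih =>
    intro re i hi hdrop hinv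
    have hne : words.drop i.toNat ≠ [] := by rw [← hdrop]; simp
    have hlt : i.toNat < words.length := List.length_lt_of_drop_ne_nil hne
    have hw : words[i.toNat]? = some w := by rw [← List.head?_drop, ← hdrop]; rfl
    -- the membership test: w already seen ↔ position i is a duplicate
    have htest : w ∈ re ↔ IsDup words i.toNat := by
      rw [hinv w, mem_take_iff' words i.toNat w]
      unfold IsDup
      constructor
      · rintro ⟨j, hj, hjw⟩; exact ⟨j, hj, by rw [hjw, hw]⟩
      · rintro ⟨j, hj, hjw⟩; exact ⟨j, hj, by rw [hjw, hw]⟩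
    by_cases hdup : IsDup words i.toNat
    · right
      refine ⟨i.toNat, le_refl _, hlt, hdup, by omega, ?_⟩
      have hmem : ¬ (re.contains w = false) := by
        simp only [List.contains_eq_mem, Bool.not_eq_false, decide_eq_true_eq]
        exact htest.mpr hdup
      simp only [dupLoopA, if_neg hmem]
      rw [show ((i.toNat : Nat) : Int) = i by omega]
    · have hmem : re.contains w = false := by
        simp only [List.contains_eq_mem, decide_eq_false_iff_not]
        exact fun hc => hdup (htest.mp hc)
      have hdrop' : rest = words.drop (i + 1).toNat := by
        have : (i+1).toNat = i.toNat + 1 := by omega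
        rw [this, List.drop_add_one_eq_tail_drop, ← hdrop]; rfl
      have hinv' : ∀ v : String, v ∈ re ++ [w] ↔ v ∈ words.take (i + 1).toNat := by
        intro v
        have : (i+1).toNat = i.toNat + 1 := by omega
        rw [this, List.take_add_one, hw]
        simp [hinv v]
      have hstep : dupLoopA n (w :: rest) re i (PySem.Int.mod i n + 1) (PySem.Int.floordiv i n + 1)
          = dupLoopA n rest (re ++ [w]) (i + 1) (PySem.Int.mod (i+1) n + 1) (PySem.Int.floordiv (i+1) n + 1) := by
        by_cases hmod : PySem.Int.mod i n = n - 1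
        · obtain ⟨h1, h2⟩ := (stepDivMod n i (by omega)).1 hmod
          show (if re.contains w = false then _ else _) = _
          rw [if_pos hmem, if_pos hmod, h1, h2]
          norm_num
        · obtain ⟨h1, h2⟩ := (stepDivMod n i (by omega)).2 hmod
          show (if re.contains w = false then _ else _) = _
          rw [if_pos hmem, if_neg hmod, h1, h2]
      rw [hstep]
      rcases ih (re ++ [w]) (i + 1) (by omega) hdrop' hinv' with ⟨h1, h2⟩ | ⟨m, hm1, hm2, hm3, hm4, hm5⟩
      · left
        refine ⟨h1, ?_⟩
        intro k hk hklen
        rcases Nat.eq_or_lt_of_le hk with heq | hlt'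
        · exact heq ▸ hdup
        · exact h2 k (by omega) hklen
      · right
        refine ⟨m, by omega, hm2, hm3, ?_, hm5⟩
        intro k hk hkm
        rcases Nat.eq_or_lt_of_le hk with heq | hlt'
        · exact heq ▸ hdup
        · exact hm4 k (by omega) hkm

-- the positions of word w, in increasing order
def posOf (words : List String) (w : String) : List Nat :=
  (List.range words.length).filter (fun j => words[j]? == some w)

lemma mem_posOf (words : List String) (w : String) (j : Nat) :
    j ∈ posOf words w ↔ j < words.length ∧ words[j]? = some w := by
  simp [posOf, List.mem_filter, List.mem_range]

lemma pairwise_posOf (words : List String) (w : String) : (posOf words w).Pairwise (· < ·) :=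
  List.Pairwise.sublist List.filter_sublist List.pairwise_lt_range

-- the grouped index lists of B's dict, read off per key
lemma zipIdx_filter_map (w : String) : ∀ (l : List String) (k : Nat),
    ((l.zipIdx k).filter (fun p => p.1 == w)).map (·.2)
      = (posOf l w).map (· + k) := by
  intro l
  induction l with
  | nil => intro k; simp [posOf]
  | cons a t ih =>
    intro k
    rw [List.zipIdx_cons]
    have hc : ((fun j => (a :: t)[j]? == some w) ∘ Nat.succ) = (fun j : Nat => t[j]? == some w) := by
      funext j; simp
    have htail : List.map (fun x => x.2) (List.filter (fun p => p.1 == w) (t.zipIdx (k+1)))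
        = List.map (fun x => x + k) (List.map Nat.succ (posOf t w)) := by
      rw [ih (k+1), List.map_map]
      apply List.map_congr_left
      intro x _
      simp only [Function.comp_apply, Nat.succ_eq_add_one]
      omega
    simp only [posOf, List.length_cons, List.range_succ_eq_map, List.filter_cons, List.filter_map, hc]
    by_cases ha : (a == w) = true
    · simp only [List.getElem?_cons_zero, ha, if_pos, show (some a == some w) = true by simpa using ha]
      simp only [List.map_cons, htail, posOf, Nat.zero_add]
    · rw [if_neg ha, if_neg (by simpa using ha)]
      simp only [htail, posOf]

-- B's occurrence dict: per-key lookup and key set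
lemma occ_getD (words : List String) (w : String) :
    ((words.zipIdx.map (fun p => (p.1, (p.2 : Int)))).foldl
        (fun d p => d.modify p.1 [] (· ++ [p.2])) PySem.Dict.empty).getD w []
      = (posOf words w).map (fun j => (j : Int)) := by
  rw [PySem.Dict.getD_foldl_modify_append]
  rw [PySem.Dict.getD_empty]
  rw [List.filter_map, List.map_map]
  have : ((fun p : String × Int => p.1 == w) ∘ fun p : String × Nat => (p.1, (p.2 : Int)))
      = fun p : String × Nat => p.1 == w := rfl
  rw [this]
  have h2 : ((fun p : String × Int => p.2) ∘ fun p : String × Nat => (p.1, (p.2 : Int)))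
      = (fun j : Nat => (j : Int)) ∘ (fun p : String × Nat => p.2) := rfl
  rw [h2, ← List.map_map]
  have hz : words.zipIdx = words.zipIdx 0 := rfl
  rw [hz, zipIdx_filter_map w words 0, List.map_map]
  simp [Function.comp_def]
  exact List.map_eq_flatMap

lemma occ_keys (words : List String) :
    ((words.zipIdx.map (fun p => (p.1, (p.2 : Int)))).foldl
        (fun d p => d.modify p.1 [] (· ++ [p.2])) PySem.Dict.empty).keys
      = PySem.Set.ofList words := by
  rw [PySem.Dict.keys_foldl_modify_key _ Prod.fst [] (fun _ p => (· ++ [p.2]))]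
  rw [List.map_map, PySem.Dict.keys_empty, PySem.Set.update_nil_left]
  have : (Prod.fst ∘ fun p : String × Nat => (p.1, (p.2 : Int))) = fun p : String × Nat => p.1 := rfl
  rw [this, List.zipIdx_map_fst]

-- membership in B's 'seconds' list
lemma mem_seconds (words : List String) (x : Int) :
    (x ∈ ((((words.zipIdx.map (fun p => (p.1, (p.2 : Int)))).foldl
          (fun d p => d.modify p.1 [] (· ++ [p.2])) PySem.Dict.empty).values.filter
            (fun ixs => decide (2 ≤ ixs.length))).map (fun ixs => PySem.List.pyGetD ixs 1 0)))
      ↔ ∃ w ∈ words, ∃ a b rest, posOf words w = a :: b :: rest ∧ x = (b : Int) := by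
  have hk := occ_keys words
  have hnd : ((words.zipIdx.map (fun p => (p.1, (p.2 : Int)))).foldl
      (fun d p => d.modify p.1 [] (· ++ [p.2])) PySem.Dict.empty).keys.Nodup := by
    rw [hk]; exact PySem.Set.nodup_ofList words
  rw [PySem.Dict.values_eq_map_keys _ hnd [], hk]
  simp only [List.map_map, List.filter_map, List.mem_map, List.mem_filter, Function.comp_apply]
  constructor
  · rintro ⟨w, ⟨hw, hlen⟩, rfl⟩
    rw [occ_getD] at hlen ⊢
    simp only [List.length_map, decide_eq_true_eq] at hlen
    obtain ⟨a, b, rest, hab⟩ : ∃ a b rest, posOf words w = a :: b :: rest := by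
      match h : posOf words w with
      | [] => rw [h] at hlen; simp at hlen
      | [a] => rw [h] at hlen; simp at hlen
      | a :: b :: rest => exact ⟨a, b, rest, rfl⟩
    refine ⟨w, (by simpa [PySem.Set.mem_ofList] using hw), a, b, rest, hab, ?_⟩
    rw [hab]
    simp [PySem.List.pyGetD_ofNat']
  · rintro ⟨w, hw, a, b, rest, hab, rfl⟩
    refine ⟨w, ⟨(by simpa [PySem.Set.mem_ofList] using hw), ?_⟩, ?_⟩
    · rw [occ_getD, hab]; simp
    · rw [occ_getD, hab]; simp [PySem.List.pyGetD_ofNat']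

-- a second occurrence is a duplicate position
lemma second_isDup (words : List String) (w : String) (a b : Nat) (rest : List Nat)
    (h : posOf words w = a :: b :: rest) : b < words.length ∧ IsDup words b := by
  have hb : b ∈ posOf words w := by rw [h]; simp
  have ha : a ∈ posOf words w := by rw [h]; simp
  rw [mem_posOf] at hb ha
  have hab : a < b := by
    have := pairwise_posOf words w
    rw [h] at this
    exact (List.pairwise_cons.mp this).1 b (by simp)
  exact ⟨hb.1, ⟨a, hab, by rw [ha.2, hb.2]⟩⟩

lemma nodup_of_no_dup (words : List String) (h : ∀ k, k < words.length → ¬ IsDup words k) :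
    words.Nodup := by
  rw [List.nodup_iff_injective_getElem]
  intro i j hij
  have hij' : words[i.1]'i.2 = words[j.1]'j.2 := hij
  by_contra hne
  rcases Nat.lt_or_ge i.1 j.1 with hlt | hge
  · exact h j.1 j.2 ⟨i.1, hlt, by
      rw [List.getElem?_eq_getElem i.2, List.getElem?_eq_getElem j.2]
      exact congrArg some hij'⟩
  · have hlt : j.1 < i.1 := by omega
    exact h i.1 i.2 ⟨j.1, hlt, by
      rw [List.getElem?_eq_getElem i.2, List.getElem?_eq_getElem j.2]
      exact (congrArg some hij').symm⟩

lemma seconds_nil_of_nodup (words : List String) (hnd : words.Nodup) :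
    ((((words.zipIdx.map (fun p => (p.1, (p.2 : Int)))).foldl
          (fun d p => d.modify p.1 [] (· ++ [p.2])) PySem.Dict.empty).values.filter
            (fun ixs => decide (2 ≤ ixs.length))).map (fun ixs => PySem.List.pyGetD ixs 1 0)) = [] := by
  by_contra h
  obtain ⟨x, hx⟩ := List.exists_mem_of_ne_nil _ h
  rw [mem_seconds] at hx
  obtain ⟨w, _, a, b, rest, hab, rfl⟩ := hx
  obtain ⟨hblt, j, hj, hjb⟩ := second_isDup words w a b rest hab
  exact absurd (List.getElem?_inj (by omega) hnd hjb) (by omega)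

-- the least duplicate position is the minimum of the second occurrences
lemma min_seconds_eq (words : List String) (m : Nat) (hm : m < words.length) (hd : IsDup words m)
    (hleast : ∀ k, k < m → ¬ IsDup words k) :
    PySem.List.min? ((((words.zipIdx.map (fun p => (p.1, (p.2 : Int)))).foldl
          (fun d p => d.modify p.1 [] (· ++ [p.2])) PySem.Dict.empty).values.filter
            (fun ixs => decide (2 ≤ ixs.length))).map (fun ixs => PySem.List.pyGetD ixs 1 0))
        (fun x => x) = some (m : Int) := by
  obtain ⟨j, hjm, hjw⟩ := hd
  obtain ⟨w, hw⟩ : ∃ w, words[m]? = some w := by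
    rw [List.getElem?_eq_getElem hm]; exact ⟨_, rfl⟩
  have hjmem : j ∈ posOf words w := by rw [mem_posOf]; exact ⟨by omega, by rw [hjw, hw]⟩
  have hmmem : m ∈ posOf words w := by rw [mem_posOf]; exact ⟨hm, hw⟩
  obtain ⟨a, b, rest, hab⟩ : ∃ a b rest, posOf words w = a :: b :: rest := by
    match h : posOf words w with
    | [] => rw [h] at hjmem; simp at hjmem
    | [a] =>
      rw [h] at hjmem hmmem; simp at hjmem hmmem
      omega
    | a :: b :: rest => exact ⟨a, b, rest, rfl⟩
  have hpw := pairwise_posOf words w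
  rw [hab] at hpw hjmem hmmem
  have hblem : b = m := by
    have hale : ∀ x ∈ b :: rest, a < x := by
      intro x hx; exact (List.pairwise_cons.mp hpw).1 x hx
    have haj : a ≤ j := by
      rcases List.mem_cons.mp hjmem with rfl | hj2
      · omega
      · exact le_of_lt (hale j hj2)
    have hmne : m ≠ a := by omega
    have hmtl : m ∈ b :: rest := by
      rcases List.mem_cons.mp hmmem with rfl | h2
      · omega
      · exact h2
    have hbm : b ≤ m := by
      rcases List.mem_cons.mp hmtl with h3 | h3
      · omega
      · exact le_of_lt ((List.pairwise_cons.mp (List.pairwise_cons.mp hpw).2).1 m h3)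
    obtain ⟨hblt, hbdup⟩ := second_isDup words w a b rest hab
    rcases Nat.lt_or_ge b m with hlt | hge
    · exact absurd hbdup (hleast b hlt)
    · omega
  have hmem2 : (m : Int) ∈ ((((words.zipIdx.map (fun p => (p.1, (p.2 : Int)))).foldl
        (fun d p => d.modify p.1 [] (· ++ [p.2])) PySem.Dict.empty).values.filter
          (fun ixs => decide (2 ≤ ixs.length))).map (fun ixs => PySem.List.pyGetD ixs 1 0)) := by
    rw [mem_seconds]
    refine ⟨w, ?_, a, b, rest, hab, by rw [hblem]⟩
    exact List.mem_of_getElem? hw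
  have hlb : ∀ x ∈ ((((words.zipIdx.map (fun p => (p.1, (p.2 : Int)))).foldl
        (fun d p => d.modify p.1 [] (· ++ [p.2])) PySem.Dict.empty).values.filter
          (fun ixs => decide (2 ≤ ixs.length))).map (fun ixs => PySem.List.pyGetD ixs 1 0)),
      (m : Int) ≤ x := by
    intro x hx
    rw [mem_seconds] at hx
    obtain ⟨w', _, a', b', rest', hab', rfl⟩ := hx
    obtain ⟨hblt', hbdup'⟩ := second_isDup words w' a' b' rest' hab'
    rcases Nat.lt_or_ge b' m with hlt | hge
    · exact absurd hbdup' (hleast b' hlt)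
    · exact_mod_cast hge
  rcases hmin : PySem.List.min? _ (fun x : Int => x) with _ | v
  · rw [PySem.List.min?_eq_none_iff] at hmin
    rw [hmin] at hmem2
    simp at hmem2
  · have h1 := PySem.List.min?_mem hmin
    have h2 := PySem.List.min?_isMin hmin _ hmem2
    have h3 := hlb v h1
    congr 1
    omega

-- ---------- chain phase ----------

-- B's staged breaks list agrees with the index scan over range(1, len)
lemma chainB_bridge (n : Int) (words : List String) :
    ∀ (t : List String) (i : Nat), 1 ≤ i → t = words.drop (i - 1) →
      chainScan n words (PySem.List.pyRange (i : Int) (words.length : Int) 1)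
        = (match (((t.zip t.tail).zipIdx i).filter
              (fun q => decide (PySem.Str.pyGet? q.1.2 0 ≠ PySem.Str.pyGet? q.1.1 (-1)))).map
                (fun q => ((q.2 : Nat) : Int)) |>.head? with
          | some k => [PySem.Int.mod k n + 1, PySem.Int.floordiv k n + 1]
          | none => [0, 0]) := by
  intro t
  induction t with
  | nil =>
    intro i hi hdrop
    have hlen : words.length ≤ i - 1 := by
      by_contra h
      exact absurd hdrop.symm (by simp [List.drop_eq_nil_iff]; omega)
    rw [PySem.List.pyRange_one_eq_nil (by exact_mod_cast by omega)]
    simp [chainScan]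
  | cons a t' ih =>
    intro i hi hdrop
    cases t' with
    | nil =>
      have hlen : words.length ≤ i := by
        have : (words.drop (i-1)).length = 1 := by rw [← hdrop]; simp
        simp [List.length_drop] at this
        omega
      rw [PySem.List.pyRange_one_eq_nil (by exact_mod_cast hlen)]
      simp [chainScan]
    | cons b t'' =>
      have hlen2 : i - 1 + 2 ≤ words.length := by
        have : (words.drop (i-1)).length = t''.length + 2 := by rw [← hdrop]; simp
        simp [List.length_drop] at this
        omega
      have hilt : i < words.length := by omega
      have ha : words[i-1]? = some a := by
        rw [← List.head?_drop, ← hdrop]; rfl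
      have hb : words[i]? = some b := by
        have : words[(i-1)+1]? = (words.drop (i-1))[1]? := by rw [List.getElem?_drop]
        rw [← hdrop] at this
        simpa [show i - 1 + 1 = i by omega] using this
      have hpga : PySem.List.pyGet? words ((i:Int) - 1) = some a := by
        rw [show (i:Int) - 1 = ((i-1 : Nat) : Int) by omega, PySem.List.pyGet?_natCast, ha]
      have hpgb : PySem.List.pyGet? words (i:Int) = some b := by
        rw [PySem.List.pyGet?_natCast, hb]
      simp only [List.tail_cons]
      rw [List.zip_cons_cons, List.zipIdx_cons, PySem.List.pyRange_one_cons (by exact_mod_cast hilt)]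
      simp only [chainScan, hpga, hpgb, Option.bind_some, List.filter_cons]
      by_cases hcond : PySem.Str.pyGet? b 0 ≠ PySem.Str.pyGet? a (-1)
      · rw [if_pos hcond, if_pos (by simpa using hcond)]
        rfl
      · rw [if_neg hcond, if_neg (by simpa using hcond)]
        have := ih (i + 1) (by omega) (by
          rw [show i + 1 - 1 = (i - 1) + 1 by omega, ← List.drop_drop, ← hdrop]
          rfl)
        rw [Nat.cast_add, Nat.cast_one] at this
        exact this

-- A's chain loop and the index scan agree step by step when 2 ≤ n

lemma chain_couple (n : Int) (hn : 2 ≤ n) (words : List String) :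
    ∀ (rest : List String) (i : Int), 1 ≤ i → rest = words.drop i.toNat →
      chainLoopA n words rest i (PySem.Int.mod i n + 1) (PySem.Int.floordiv i n + 1)
        = chainScan n words (PySem.List.pyRange i (words.length : Int) 1) := by
  intro rest
  induction rest with
  | nil =>
    intro i hi hdrop
    have hlen : words.length ≤ i.toNat := by
      by_contra h
      exact absurd hdrop.symm (by simp [List.drop_eq_nil_iff]; omega)
    rw [PySem.List.pyRange_one_eq_nil (by omega)]
    simp [chainLoopA, chainScan]
  | cons w rest' ih =>
    intro i hi hdrop
    have hne : words.drop i.toNat ≠ [] := by rw [← hdrop]; simp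
    have hlt : i.toNat < words.length := List.length_lt_of_drop_ne_nil hne
    have hw : words[i.toNat]? = some w := by
      rw [← List.head?_drop, ← hdrop]; rfl
    have hw' : w = words[i.toNat] := by
      have := List.getElem?_eq_getElem (l := words) (i := i.toNat) hlt
      rw [this] at hw; exact (Option.some.inj hw).symm
    have hpg : PySem.List.pyGet? words i = some w := by
      rw [pyGet?_of_toNat_lt words i (by omega) hlt, hw']
    rw [PySem.List.pyRange_one_cons (by omega)]
    have hi0 : ¬ (i = 0) := by omega
    by_cases hcond : PySem.Str.pyGet? w 0 ≠ ((PySem.List.pyGet? words (i - 1)).bind fun p => PySem.Str.pyGet? p (-1))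
    · simp only [chainLoopA, chainScan, hpg, if_neg hi0, Option.bind_some] at *
      rw [if_pos hcond, if_pos hcond]
    · simp only [chainLoopA, chainScan, hpg, if_neg hi0, Option.bind_some] at *
      rw [if_neg hcond, if_neg hcond]
      have hdrop' : rest' = words.drop (i + 1).toNat := by
        have : (i+1).toNat = i.toNat + 1 := by omega
        rw [this, List.drop_add_one_eq_tail_drop, ← hdrop]; rfl
      have hstep := stepDivMod n i (by omega)
      by_cases hmod : PySem.Int.mod i n = n - 1
      · obtain ⟨h1, h2⟩ := hstep.1 hmod
        rw [if_pos hmod]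
        have := ih (i + 1) (by omega) hdrop'
        rw [h1, h2] at this
        simpa using this
      · obtain ⟨h1, h2⟩ := hstep.2 hmod
        rw [if_neg hmod]
        have := ih (i + 1) (by omega) hdrop'
        rw [h1, h2] at this
        exact this

-- an unbroken chain means the failure test is false at every index i ≥ 1
lemma chain_cond_false (words : List String)
    (hch : List.IsChain (fun a b => b.toList.head? = a.toList.getLast?) words)
    (i : Int) (hi : 1 ≤ i) (hlt : i.toNat < words.length) (w : String) (hw : w = words[i.toNat]) :
    ¬ (PySem.Str.pyGet? w 0 ≠ ((PySem.List.pyGet? words (i - 1)).bind fun p => PySem.Str.pyGet? p (-1))) := by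
  have hprev : PySem.List.pyGet? words (i - 1) = some (words[(i-1).toNat]) :=
    pyGet?_of_toNat_lt words (i-1) (by omega) (by omega)
  rw [hprev, Option.bind_some, strGet_zero, strGet_neg_one, hw]
  have := (List.isChain_iff_getElem.mp hch) (i.toNat - 1) (by omega)
  simp only [not_not]
  have e1 : words[i.toNat - 1 + 1]'(by omega) = words[i.toNat]'hlt := getElem_congr rfl (by omega) (by omega)
  have e2 : words[(i - 1).toNat]'(by omega) = words[i.toNat - 1]'(by omega) := getElem_congr rfl (by omega) (by omega)
  rw [e2, ← e1]
  exact this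

lemma chainA_ok (n : Int) (words : List String)
    (hch : List.IsChain (fun a b => b.toList.head? = a.toList.getLast?) words) :
    ∀ (rest : List String) (i player turn : Int), 1 ≤ i → rest = words.drop i.toNat →
      chainLoopA n words rest i player turn = [0, 0] := by
  intro rest
  induction rest with
  | nil => intro i player turn hi hdrop; simp [chainLoopA]
  | cons w rest' ih =>
    intro i player turn hi hdrop
    have hne : words.drop i.toNat ≠ [] := by rw [← hdrop]; simp
    have hlt : i.toNat < words.length := List.length_lt_of_drop_ne_nil hne
    have hw : words[i.toNat]? = some w := by rw [← List.head?_drop, ← hdrop]; rfl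
    have hw' : w = words[i.toNat] := by
      have := List.getElem?_eq_getElem (l := words) (i := i.toNat) hlt
      rw [this] at hw; exact (Option.some.inj hw).symm
    have hcond := chain_cond_false words hch i hi hlt w hw'
    have hdrop' : rest' = words.drop (i + 1).toNat := by
      have : (i+1).toNat = i.toNat + 1 := by omega
      rw [this, List.drop_add_one_eq_tail_drop, ← hdrop]; rfl
    simp only [chainLoopA, if_neg (show ¬ (i = 0) by omega), if_neg hcond]
    by_cases hmod : PySem.Int.mod i n = n - 1
    · rw [if_pos hmod]; exact ih (i+1) 1 (turn+1) (by omega) hdrop'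
    · rw [if_neg hmod]; exact ih (i+1) (player+1) turn (by omega) hdrop'

lemma chainB_ok (n : Int) (words : List String)
    (hch : List.IsChain (fun a b => b.toList.head? = a.toList.getLast?) words) :
    ∀ (rest : List String) (i : Int), 1 ≤ i → rest = words.drop i.toNat →
      chainScan n words (PySem.List.pyRange i (words.length : Int) 1) = [0, 0] := by
  intro rest
  induction rest with
  | nil =>
    intro i hi hdrop
    have hlen : words.length ≤ i.toNat := by
      by_contra h
      exact absurd hdrop.symm (by simp [List.drop_eq_nil_iff]; omega)
    rw [PySem.List.pyRange_one_eq_nil (by omega)]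
    simp [chainScan]
  | cons w rest' ih =>
    intro i hi hdrop
    have hne : words.drop i.toNat ≠ [] := by rw [← hdrop]; simp
    have hlt : i.toNat < words.length := List.length_lt_of_drop_ne_nil hne
    have hw : words[i.toNat]? = some w := by rw [← List.head?_drop, ← hdrop]; rfl
    have hw' : w = words[i.toNat] := by
      have := List.getElem?_eq_getElem (l := words) (i := i.toNat) hlt
      rw [this] at hw; exact (Option.some.inj hw).symm
    have hpg : PySem.List.pyGet? words i = some w := by
      rw [pyGet?_of_toNat_lt words i (by omega) hlt, hw']
    have hcond := chain_cond_false words hch i hi hlt w hw'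
    have hdrop' : rest' = words.drop (i + 1).toNat := by
      have : (i+1).toNat = i.toNat + 1 := by omega
      rw [this, List.drop_add_one_eq_tail_drop, ← hdrop]; rfl
    rw [PySem.List.pyRange_one_cons (by omega)]
    simp only [chainScan, hpg, Option.bind_some]
    rw [if_neg hcond]
    exact ih (i+1) (by omega) hdrop'

-- full chain phase equality (n ≥ 2, or unbroken chain)
lemma chain_phase (n : Int) (words : List String)
    (h : 2 ≤ n ∨ List.IsChain (fun a b => b.toList.head? = a.toList.getLast?) words) :
    chainLoopA n words words 0 2 1 = chainScan n words (PySem.List.pyRange 1 (words.length : Int) 1) := by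
  cases words with
  | nil =>
    rw [PySem.List.pyRange_one_eq_nil (by simp)]
    simp [chainLoopA, chainScan]
  | cons w0 t =>
    have hA0 : chainLoopA n (w0 :: t) (w0 :: t) 0 2 1 = chainLoopA n (w0 :: t) t 1 2 1 := by
      simp [chainLoopA]
    rw [hA0]
    rcases h with hn2 | hch
    · have h2 : (2:Int) = PySem.Int.mod 1 n + 1 := by rw [mod_one_eq n hn2]; norm_num
      have h1 : (1:Int) = PySem.Int.floordiv 1 n + 1 := by rw [floordiv_one_eq n hn2]; norm_num
      rw [show chainLoopA n (w0 :: t) t 1 2 1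
          = chainLoopA n (w0 :: t) t 1 (PySem.Int.mod 1 n + 1) (PySem.Int.floordiv 1 n + 1) by rw [← h2, ← h1]]
      exact chain_couple n hn2 (w0 :: t) t 1 (by omega) (by simp)
    · rw [chainA_ok n (w0 :: t) hch t 1 2 1 (by omega) (by simp),
        chainB_ok n (w0 :: t) hch t 1 (by omega) (by simp)]

-- n = 1: the two chain computations walk the same indices but A's state lags one turn behind
lemma mod_one_right (i : Int) : PySem.Int.mod i 1 = 0 := by
  rw [PySem.Int.mod_eq_emod_of_pos (by norm_num)]; simp

lemma floordiv_one_right (i : Int) : PySem.Int.floordiv i 1 = i := by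
  rw [PySem.Int.floordiv_eq_ediv_of_pos (by norm_num)]; simp

lemma chain_tight (words : List String) :
    ∀ (rest : List String) (i p t : Int), 1 ≤ i → rest = words.drop i.toNat →
      ((i = 1 ∧ p = 2 ∧ t = 1) ∨ (p = 1 ∧ t = i)) →
      (∃ k : Nat, i.toNat ≤ k ∧ ∃ (h : k < words.length), 1 ≤ k ∧
          ¬ ((words[k]'h).toList.head? = (words[k-1]'(by omega)).toList.getLast?)) →
      chainLoopA 1 words rest i p t ≠ chainScan 1 words (PySem.List.pyRange i (words.length : Int) 1) := by
  intro rest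
  induction rest with
  | nil =>
    intro i p t hi hdrop _ hex
    obtain ⟨k, hk1, hk2, _⟩ := hex
    have : words.length ≤ i.toNat := by
      by_contra h
      exact absurd hdrop.symm (by simp [List.drop_eq_nil_iff]; omega)
    omega
  | cons w rest' ih =>
    intro i p t hi hdrop hstate hex
    have hne : words.drop i.toNat ≠ [] := by rw [← hdrop]; simp
    have hlt : i.toNat < words.length := List.length_lt_of_drop_ne_nil hne
    have hw : words[i.toNat]? = some w := by rw [← List.head?_drop, ← hdrop]; rfl
    have hw' : w = words[i.toNat] := by
      have := List.getElem?_eq_getElem (l := words) (i := i.toNat) hlt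
      rw [this] at hw; exact (Option.some.inj hw).symm
    have hpg : PySem.List.pyGet? words i = some w := by
      rw [pyGet?_of_toNat_lt words i (by omega) hlt, hw']
    have hprev : PySem.List.pyGet? words (i - 1) = some (words[(i-1).toNat]) :=
      pyGet?_of_toNat_lt words (i-1) (by omega) (by omega)
    rw [PySem.List.pyRange_one_cons (by omega)]
    have hi0 : ¬ (i = 0) := by omega
    by_cases hcond : PySem.Str.pyGet? w 0 ≠ ((PySem.List.pyGet? words (i - 1)).bind fun q => PySem.Str.pyGet? q (-1))
    · simp only [chainLoopA, chainScan, hpg, if_neg hi0, Option.bind_some] at *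
      rw [if_pos hcond, if_pos hcond, mod_one_right, floordiv_one_right]
      intro hcontra
      simp only [List.cons.injEq] at hcontra
      rcases hstate with ⟨_, hp, ht⟩ | ⟨hp, ht⟩ <;> omega
    · simp only [chainLoopA, chainScan, hpg, if_neg hi0, Option.bind_some] at *
      rw [if_neg hcond, if_neg hcond]
      have hmod : PySem.Int.mod i 1 = (1:Int) - 1 := by rw [mod_one_right]; norm_num
      rw [if_pos hmod]
      have hdrop' : rest' = words.drop (i + 1).toNat := by
        have : (i+1).toNat = i.toNat + 1 := by omega
        rw [this, List.drop_add_one_eq_tail_drop, ← hdrop]; rfl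
      have hstate' : ((i + 1 = 1 ∧ (1:Int) = 2 ∧ t + 1 = 1) ∨ ((1:Int) = 1 ∧ t + 1 = i + 1)) := by
        rcases hstate with ⟨hi1, _, ht⟩ | ⟨_, ht⟩ <;> omega
      have hex' : (∃ k : Nat, (i+1).toNat ≤ k ∧ ∃ (h : k < words.length), 1 ≤ k ∧
          ¬ ((words[k]'h).toList.head? = (words[k-1]'(by omega)).toList.getLast?)) := by
        obtain ⟨k, hk1, hk2, hk3, hk4⟩ := hex
        refine ⟨k, ?_, hk2, hk3, hk4⟩
        rcases Nat.eq_or_lt_of_le hk1 with heq | hlt'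
        · exfalso
          apply hcond
          rw [hw', hprev, Option.bind_some, strGet_zero, strGet_neg_one]
          intro hEq
          apply hk4
          have e1 : words[k]'hk2 = words[i.toNat]'hlt := getElem_congr rfl (by omega) (by omega)
          have e2 : words[k-1]'(by omega) = words[(i-1).toNat]'(by omega) :=
            getElem_congr rfl (by omega) (by omega)
          rw [e1, e2]
          exact hEq
        · omega
      exact ih (i+1) 1 (t+1) (by omega) hdrop' hstate' hex'


-- PySem.List.enumerate, rebased onto List.zipIdx for the lemmas above
lemma enumerate_eq_zipIdx {α : Type} : ∀ (l : List α) (k : Nat),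
    PySem.List.enumerate l (k : Int) = (l.zipIdx k).map (fun p => (((p.2 : Nat) : Int), p.1)) := by
  intro l
  induction l with
  | nil => intro k; simp [PySem.List.enumerate]
  | cons x t ih =>
    intro k
    rw [List.zipIdx_cons, List.map_cons]
    show (↑k, x) :: PySem.List.enumerate t ((k : Int) + 1) = _
    rw [show (k : Int) + 1 = ((k + 1 : Nat) : Int) by omega, ih (k + 1)]

lemma alt_pairs_eq (words : List String) :
    (PySem.List.enumerate words).map (fun p => (p.2, p.1))
      = words.zipIdx.map (fun p => (p.1, (p.2 : Int))) := by
  show (PySem.List.enumerate words ((0 : Nat) : Int)).map (fun p => (p.2, p.1)) = _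
  rw [enumerate_eq_zipIdx words 0, List.map_map]
  rfl

lemma alt_breaks_eq (words : List String) :
    ((PySem.List.enumerate (List.zip words words.tail) 1).filter
        (fun q => decide (PySem.Str.pyGet? q.2.2 0 ≠ PySem.Str.pyGet? q.2.1 (-1)))).map (fun q => q.1)
      = (((words.zip words.tail).zipIdx 1).filter
          (fun q => decide (PySem.Str.pyGet? q.1.2 0 ≠ PySem.Str.pyGet? q.1.1 (-1)))).map
            (fun q => ((q.2 : Nat) : Int)) := by
  show ((PySem.List.enumerate (List.zip words words.tail) ((1 : Nat) : Int)).filter _).map _ = _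
  rw [enumerate_eq_zipIdx _ 1, List.filter_map, List.map_map]
  rfl

-- B's two stages, named for the main proofs
lemma alt_eq_chainScan (n : Int) (words : List String) (hnd : words.Nodup) :
    solution_alt n words = chainScan n words (PySem.List.pyRange 1 (words.length : Int) 1) := by
  simp only [solution_alt, alt_pairs_eq, alt_breaks_eq]
  rw [seconds_nil_of_nodup words hnd]
  rw [show PySem.List.min? ([] : List Int) (fun x => x) = none from
    (PySem.List.min?_eq_none_iff _ _).mpr rfl]
  have hb := chainB_bridge n words words 1 (by omega) (by simp)
  rw [Nat.cast_one] at hb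
  exact hb.symm

lemma alt_eq_dup (n : Int) (words : List String) (m : Nat) (hm : m < words.length)
    (hd : IsDup words m) (hleast : ∀ k, k < m → ¬ IsDup words k) :
    solution_alt n words = [PySem.Int.mod (m : Int) n + 1, PySem.Int.floordiv (m : Int) n + 1] := by
  simp only [solution_alt, alt_pairs_eq]
  rw [min_seconds_eq words m hm hd hleast]

-- ===== VERDICT (by name: the statement is the Claim_ definition above) =====
theorem solution_spec : Claim_unchanged_solution := by
  intro n words _hdom hpre hND
  obtain ⟨hn, _⟩ := hpre
  rcases hn with hn | ⟨_, hnodup, hch⟩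
  · by_cases hnodup : words.Nodup
    · have hlen : ((PySem.Set.ofList words).length : Int) = (words.length : Int) := by
        have hnat := (setLen_eq_iff words).mpr hnodup
        exact_mod_cast hnat
      unfold solution
      rw [if_neg (by omega), alt_eq_chainScan n words hnodup]
      apply chain_phase n words
      rcases (show n = 1 ∨ 2 ≤ n by omega) with h1 | h2
      · right
        by_contra hch
        exact hND ⟨h1, hnodup, hch⟩
      · left; exact h2
    · have hlen : ((PySem.Set.ofList words).length : Int) ≠ (words.length : Int) := by
        intro h
        exact hnodup ((setLen_eq_iff words).mp (by exact_mod_cast h))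
      unfold solution
      rw [if_pos hlen]
      have hinit1 : (1:Int) = PySem.Int.mod 0 n + 1 := by rw [mod_zero_eq n (by omega)]; norm_num
      have hinit2 : (1:Int) = PySem.Int.floordiv 0 n + 1 := by rw [floordiv_zero_eq n (by omega)]; norm_num
      have hspec := dupA_spec n hn words words [] 0 (by omega) (by simp) (by simp)
      rcases hspec with ⟨_, hnone⟩ | ⟨m, _, hm2, hm3, hm4, hm5⟩
      · exact absurd (nodup_of_no_dup words (fun k hk => hnone k (by omega) hk)) hnodup
      · rw [show dupLoopA n words [] 0 1 1
            = dupLoopA n words [] 0 (PySem.Int.mod 0 n + 1) (PySem.Int.floordiv 0 n + 1) by rw [← hinit1, ← hinit2]]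
        rw [hm5, alt_eq_dup n words m hm2 hm3 (fun k hk => hm4 k (by omega) hk)]
  · have hlen : ((PySem.Set.ofList words).length : Int) = (words.length : Int) := by
      have hnat := (setLen_eq_iff words).mpr hnodup
      exact_mod_cast hnat
    unfold solution
    rw [if_neg (by omega), alt_eq_chainScan n words hnodup]
    exact chain_phase n words (Or.inr hch)

theorem solution_changed : Claim_changed_solution := by
  unfold Claim_changed_solution; decide

theorem solution_tight : Claim_exact_solution := by
  intro n words _hdom hpre hD
  obtain ⟨h1, hnodup, hnch⟩ := hD
  subst h1
  obtain ⟨_, _⟩ := hpre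
  have hlen : ((PySem.Set.ofList words).length : Int) = (words.length : Int) := by
    have hnat := (setLen_eq_iff words).mpr hnodup
    exact_mod_cast hnat
  unfold solution
  rw [if_neg (by omega), alt_eq_chainScan 1 words hnodup]
  have hex : ∃ k : Nat, (1:Int).toNat ≤ k ∧ ∃ (h : k < words.length), 1 ≤ k ∧
      ¬ ((words[k]'h).toList.head? = (words[k-1]'(by omega)).toList.getLast?) := by
    rw [List.isChain_iff_getElem] at hnch
    push Not at hnch
    obtain ⟨j, hj, hbad⟩ := hnch
    exact ⟨j + 1, by omega, by omega, by omega, by simpa using hbad⟩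
  cases words with
  | nil =>
    obtain ⟨k, _, hk, _⟩ := hex
    simp at hk
  | cons w0 tl =>
    have hA0 : chainLoopA 1 (w0 :: tl) (w0 :: tl) 0 2 1 = chainLoopA 1 (w0 :: tl) tl 1 2 1 := by
      simp [chainLoopA]
    rw [hA0]
    exact chain_tight (w0 :: tl) tl 1 2 1 (by omega) (by simp) (by left; omega) hex
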